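-- pv_equiv track=rewrite | github.com/Br10Consultoria/webhuawei | services/router.py | _clean_ssh_output
-- ===== SOURCE A (Python) =====
-- def _clean_ssh_output(output: str, command: str) -> str:
--     """Limpa output SSH removendo comando e prompts."""
--     lines = output.split('\n')
--     cleaned_lines = []
--
--     skip_command = True
--
--     for line in lines:
--         line = line.strip()
--
--         # Pular linha com o comando digitado
--         if skip_command and command.strip() in line:
--             skip_command = False
--             continue
--
--         # Pular prompts e linhas vazias
--         if (line.endswith('>') or line.endswith('#') or
--             line.endswith(']') or line.endswith('<') or
--             not line):
--             continue
--
--         cleaned_lines.append(line)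
--
--     return '\n'.join(cleaned_lines).strip()
-- ===== SOURCE B (Python) =====
-- def _clean_ssh_output(output: str, command: str) -> str:
--     """Two phases: scan for the index of the echoed command line, then walk the
--     lines BACKWARDS building the final text directly (no join, no final strip)."""
--     cmd = command.strip()
--     lines = [l.strip() for l in output.split('\n')]
--
--     # phase 1: index of the first line echoing the command (len(lines) if none)
--     boundary = len(lines)
--     for i, l in enumerate(lines):
--         if cmd in l:
--             boundary = i
--             break
--
--     # phase 2: back-to-front accumulation of the cleaned text
--     text = ''
--     for i in range(len(lines) - 1, -1, -1):
--         if i == boundary: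
--             continue
--         l = lines[i]
--         if not l or l[-1] in '>#]<':
--             continue
--         text = l if not text else l + '\n' + text
--     return text
-- ===== Notes on version B (the rewrite author's own statement) =====
-- stated objective: alternative
-- what changed: Replaced A's forward skip-flag loop that collects a line list and finishes with join+strip by a two-phase scheme: first an index scan locating the echoed command line, then a BACKWARDS walk over the stripped lines that assembles the final text string directly (prepending with an explicit separator), so the join and the trailing strip disappear.
import Mathlib
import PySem

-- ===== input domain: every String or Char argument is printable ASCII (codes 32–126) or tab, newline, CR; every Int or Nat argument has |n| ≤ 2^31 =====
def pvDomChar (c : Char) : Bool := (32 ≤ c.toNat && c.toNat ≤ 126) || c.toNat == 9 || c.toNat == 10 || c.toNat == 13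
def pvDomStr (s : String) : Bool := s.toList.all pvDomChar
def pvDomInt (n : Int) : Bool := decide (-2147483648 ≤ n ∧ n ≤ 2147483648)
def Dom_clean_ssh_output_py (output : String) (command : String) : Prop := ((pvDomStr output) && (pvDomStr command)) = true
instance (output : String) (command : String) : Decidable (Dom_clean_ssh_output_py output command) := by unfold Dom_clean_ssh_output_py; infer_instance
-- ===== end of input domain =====

-- B replaces A's forward skip-flag loop (collect lines, join, final strip) by an index
-- scan for the echoed command plus a backwards walk assembling the text directly
-- (alternative decomposition, same cost). Ports work on List Char via PySem.Chars.

-- ===== PORT A =====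
-- A's for-loop: raw lines plus the skip_command flag, stripping each line inside the loop
def cleanLoopA (command : List Char) : List (List Char) → Bool → List (List Char)
  | [], _ => []
  | l :: rest, skip =>
    let line := PySem.Chars.strip l
    if skip && PySem.Chars.isIn (PySem.Chars.strip command) line then
      cleanLoopA command rest false
    else if PySem.Chars.endswith line ['>'] || PySem.Chars.endswith line ['#'] ||
            PySem.Chars.endswith line [']'] || PySem.Chars.endswith line ['<'] ||
            line.isEmpty then
      cleanLoopA command rest skip
    else
      line :: cleanLoopA command rest skip

def clean_ssh_output_py (output : String) (command : String) : String :=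
  String.mk (PySem.Chars.strip (PySem.Chars.join ['\n']
    (cleanLoopA command.toList (PySem.Chars.splitOn output.toList ['\n']) true)))

-- ===== PORT B =====
-- B's `l[-1] in '>#]<'` (only reached on a nonempty l)
def pvLastIn (l : List Char) : Bool :=
  match PySem.List.pyGet? l (-1) with
  | some c => ['>', '#', ']', '<'].contains c
  | none => false

-- B's phase 1: the enumerate-loop with break (index of first match; length if none)
def scanB (cmd : List Char) : List (List Char) → Nat
  | [] => 0
  | l :: ls => if PySem.Chars.isIn cmd l then 0 else scanB cmd ls + 1

-- B's phase 2: the backwards for-loop — text for the suffix starting at index i is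
-- built from the text of the suffix starting at i+1, exactly as the loop accumulates
def buildB (boundary : Nat) : List (List Char) → Nat → List Char
  | [], _ => []
  | l :: ls, i =>
    let text := buildB boundary ls (i + 1)
    if i == boundary then text
    else if l.isEmpty || pvLastIn l then text
    else if text.isEmpty then l else l ++ '\n' :: text

def clean_ssh_output_py_alt (output : String) (command : String) : String :=
  let cmd := PySem.Chars.strip command.toList
  let lines := (PySem.Chars.splitOn output.toList ['\n']).map PySem.Chars.strip
  String.mk (buildB (scanB cmd lines) lines 0)

-- ===== PRECONDITION & SPEC =====
def Spec_clean_ssh_output_py (output : String) (command : String) (out : String) : Prop := out = clean_ssh_output_py_alt output command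
instance (output : String) (command : String) (out : String) : Decidable (Spec_clean_ssh_output_py output command out) := by unfold Spec_clean_ssh_output_py; infer_instance

-- ===== CLAIM (what is proved, stated in full; the proofs are below) =====
def Claim_equal_clean_ssh_output_py : Prop := ∀ (output : String) (command : String), Dom_clean_ssh_output_py output command → Spec_clean_ssh_output_py output command (clean_ssh_output_py output command)

-- ===== LEMMAS AND PROOFS =====

-- B's keep-predicate on an (already stripped) line
def pvGood (l : List Char) : Bool := !(l.isEmpty || pvLastIn l)

-- B's gluing step, abstracted: glue the good lines of ks back-to-front
def pvGlue : List (List Char) → List Char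
  | [] => []
  | k :: ks =>
    let text := pvGlue ks
    if text.isEmpty then k else k ++ '\n' :: text

lemma pvGlue_cons (k : List Char) (ks : List (List Char)) :
    pvGlue (k :: ks) = if (pvGlue ks).isEmpty then k else k ++ '\n' :: pvGlue ks := rfl

-- A's skip-condition is the negation of B's keep-predicate
lemma endswith_single (l : List Char) (c x : Char) :
    PySem.Chars.endswith (l ++ [c]) [x] = (c == x) := by
  by_cases h : c = x
  · subst h
    simp only [beq_self_eq_true]
    exact (PySem.Chars.endswith_iff _ _).mpr ⟨l, rfl⟩
  · have : ¬ PySem.Chars.endswith (l ++ [c]) [x] = true := by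
      rw [PySem.Chars.endswith_iff]
      rintro ⟨t, ht⟩
      have := congrArg List.getLast? ht
      simp at this
      exact h this.symm
    simp only [Bool.not_eq_true] at this
    simp [this, h]

lemma pvLastIn_concat (init : List Char) (c : Char) :
    pvLastIn (init ++ [c]) = ((c == '>') || (c == '#') || (c == ']') || (c == '<')) := by
  have h1 : PySem.List.pyIdx? (init ++ [c]).length (-1) = some init.length := by
    unfold PySem.List.pyIdx?
    split_ifs with h1 h2 <;> simp_all
  have hget : PySem.List.pyGet? (init ++ [c]) (-1) = some c := by
    rw [PySem.List.pyGet?, h1]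
    simp
  simp only [pvLastIn, hget]
  simp only [List.contains_cons, List.contains_nil, Bool.or_false, Bool.or_assoc]

lemma pvCond_eq (l : List Char) :
    (PySem.Chars.endswith l ['>'] || PySem.Chars.endswith l ['#'] ||
     PySem.Chars.endswith l [']'] || PySem.Chars.endswith l ['<'] || l.isEmpty) = !pvGood l := by
  rcases List.eq_nil_or_concat l with rfl | ⟨init, c, rfl⟩
  · decide
  · simp only [List.concat_eq_append, pvGood, endswith_single, pvLastIn_concat]
    cases h0 : (init ++ [c]).isEmpty
    · cases h1 : (c == '>') <;> cases h2 : (c == '#') <;> cases h3 : (c == ']') <;>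
        cases h4 : (c == '<') <;> simp [h1, h2, h3, h4, h0]
    · simp at h0

-- with the flag consumed, A's loop = filter pvGood over the stripped lines
lemma cleanLoopA_false (command : List Char) (ls : List (List Char)) :
    cleanLoopA command ls false = (ls.map PySem.Chars.strip).filter pvGood := by
  induction ls with
  | nil => rfl
  | cons l rest ih =>
    simp only [cleanLoopA, Bool.false_and, if_neg (Bool.false_ne_true), pvCond_eq,
      List.map_cons, List.filter_cons, ih]
    cases pvGood (PySem.Chars.strip l) <;> simp

-- index shift: bumping boundary and position together changes nothing
lemma buildB_shift (ls : List (List Char)) (b i : Nat) :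
    buildB (b + 1) ls (i + 1) = buildB b ls i := by
  induction ls generalizing i with
  | nil => rfl
  | cons l rest ih =>
    have hb : ((i + 1 == b + 1)) = (i == b) := by simp
    simp only [buildB, ih, hb]

-- past the boundary, B's backwards loop is glue-of-filter
lemma buildB_past (ls : List (List Char)) (b i : Nat) (h : b < i) :
    buildB b ls i = pvGlue (ls.filter pvGood) := by
  induction ls generalizing i with
  | nil => rfl
  | cons l rest ih =>
    have hne : (i == b) = false := by simp; omega
    simp only [buildB, hne, List.filter_cons, ih (i + 1) (by omega)]
    by_cases hg : (l.isEmpty || pvLastIn l) = true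
    · simp [hg, pvGood, pvGlue]
    · simp [hg, pvGood, pvGlue] at *

-- B's two phases compute glue of A's kept-line list
lemma buildB_eq_glue (cmd : List Char) (raw : List (List Char)) :
    buildB (scanB (PySem.Chars.strip cmd) (raw.map PySem.Chars.strip)) (raw.map PySem.Chars.strip) 0 =
      pvGlue (cleanLoopA cmd raw true) := by
  induction raw with
  | nil => rfl
  | cons l rest ih =>
    simp only [List.map_cons, scanB, cleanLoopA, Bool.true_and]
    by_cases hm : PySem.Chars.isIn (PySem.Chars.strip cmd) (PySem.Chars.strip l) = true
    · rw [if_pos hm, if_pos hm]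
      simp only [buildB, BEq.rfl, if_pos rfl]
      rw [buildB_past _ 0 1 (by omega), cleanLoopA_false]
      simp
    · rw [if_neg hm, if_neg hm, pvCond_eq]
      have h0 : ((0 : Nat) == scanB (PySem.Chars.strip cmd) (rest.map PySem.Chars.strip) + 1) = false := by
        simp
      simp only [buildB, h0, Bool.false_eq_true, if_false,
        buildB_shift (rest.map PySem.Chars.strip) _ 0, ih]
      cases hg : pvGood (PySem.Chars.strip l)
      · have he : ((PySem.Chars.strip l).isEmpty || pvLastIn (PySem.Chars.strip l)) = true := by
          revert hg
          rw [pvGood]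
          cases (PySem.Chars.strip l).isEmpty || pvLastIn (PySem.Chars.strip l) <;> simp
        rw [he]
        simp [pvGlue_cons]
      · have he : ((PySem.Chars.strip l).isEmpty || pvLastIn (PySem.Chars.strip l)) = false := by
          revert hg
          rw [pvGood]
          cases (PySem.Chars.strip l).isEmpty || pvLastIn (PySem.Chars.strip l) <;> simp
        rw [he]
        simp [pvGlue_cons]

-- every kept line is a nonempty stripped line
lemma cleanLoopA_mem (cmd : List Char) (raw : List (List Char)) (b : Bool) :
    ∀ k ∈ cleanLoopA cmd raw b, (∃ l, k = PySem.Chars.strip l) ∧ pvGood k = true := by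
  induction raw generalizing b with
  | nil => intro k hk; simp [cleanLoopA] at hk
  | cons l rest ih =>
    intro k hk
    simp only [cleanLoopA, pvCond_eq] at hk
    by_cases h1 : (b && PySem.Chars.isIn (PySem.Chars.strip cmd) (PySem.Chars.strip l)) = true
    · rw [if_pos h1] at hk
      exact ih false k hk
    · rw [if_neg h1] at hk
      cases hg : pvGood (PySem.Chars.strip l)
      · rw [hg] at hk
        simp only [Bool.not_false, if_pos rfl] at hk
        exact ih b k hk
      · rw [hg] at hk
        simp only [Bool.not_true, Bool.false_eq_true, if_false, List.mem_cons] at hk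
        rcases hk with rfl | hk
        · exact ⟨⟨l, rfl⟩, hg⟩
        · exact ih b k hk

-- glue = join when all pieces are nonempty
lemma join_ne_nil (k : List Char) (ks : List (List Char)) (hk : k ≠ []) :
    PySem.Chars.join ['\n'] (k :: ks) ≠ [] := by
  cases ks with
  | nil => simpa [PySem.Chars.join_singleton] using hk
  | cons b bs => simp [PySem.Chars.join_cons_cons]

lemma pvGlue_eq_join (ks : List (List Char)) (h : ∀ k ∈ ks, k ≠ []) :
    pvGlue ks = PySem.Chars.join ['\n'] ks := by
  induction ks with
  | nil => rfl
  | cons k ks ih =>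
    cases ks with
    | nil => simp [pvGlue, PySem.Chars.join_singleton]
    | cons b bs =>
      have hb := join_ne_nil b bs (h b (by simp))
      have ihr := ih (fun x hx => h x (by simp [hx]))
      rw [pvGlue_cons, ihr, if_neg (by simpa [List.isEmpty_iff] using hb),
        PySem.Chars.join_cons_cons]
      simp

-- a nonempty stripped line has non-space endpoints, so stripping the join is a no-op
-- strip s is a prefix of lstrip s
lemma pvStrip_prefix (s : List Char) : PySem.Chars.strip s <+: PySem.Chars.lstrip s := by
  unfold PySem.Chars.strip PySem.Chars.rstrip
  have hsuf : List.dropWhile PySem.Chars.isspace (PySem.Chars.lstrip s).reverse <:+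
      (PySem.Chars.lstrip s).reverse := List.dropWhile_suffix _
  have := hsuf.reverse
  rwa [List.reverse_reverse] at this

lemma strip_head_not_space (s : List Char) (c : Char)
    (h : (PySem.Chars.strip s).head? = some c) : PySem.Chars.isspace c = false := by
  obtain ⟨t, ht⟩ := pvStrip_prefix s
  have hu : (PySem.Chars.lstrip s).head? = some c := by
    rw [← ht, List.head?_append, h]
    rfl
  have hd : PySem.Chars.lstrip s ≠ [] := by
    intro h0; rw [h0] at hu; simp at hu
  have hhead := List.head_dropWhile_not PySem.Chars.isspace (l := s) (w := hd)
  rw [List.head?_eq_head hd] at hu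
  rw [Option.some_inj] at hu
  rw [← hu]
  exact hhead

lemma strip_getLast_not_space (s : List Char) (c : Char)
    (h : (PySem.Chars.strip s).getLast? = some c) : PySem.Chars.isspace c = false := by
  have hrev : (PySem.Chars.strip s).reverse =
      List.dropWhile PySem.Chars.isspace (PySem.Chars.lstrip s).reverse := by
    unfold PySem.Chars.strip PySem.Chars.rstrip
    rw [List.reverse_reverse]
  have hh : (PySem.Chars.strip s).reverse.head? = some c := by
    rw [List.head?_reverse]; exact h
  rw [hrev] at hh
  have hd : List.dropWhile PySem.Chars.isspace (PySem.Chars.lstrip s).reverse ≠ [] := by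
    intro h0; rw [h0] at hh; simp at hh
  have := List.head_dropWhile_not PySem.Chars.isspace (w := hd)
  rw [List.head?_eq_head hd, Option.some_inj] at hh
  rw [← hh]
  exact this

lemma join_getLast_not_space (ks : List (List Char))
    (h : ∀ k ∈ ks, (∃ l, k = PySem.Chars.strip l) ∧ k ≠ []) (c : Char)
    (hc : (PySem.Chars.join ['\n'] ks).getLast? = some c) : PySem.Chars.isspace c = false := by
  induction ks with
  | nil =>
    rw [show PySem.Chars.join ['\n'] ([] : List (List Char)) = [] from rfl] at hc
    simp at hc
  | cons k ks ih =>
    cases ks with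
    | nil =>
      rw [PySem.Chars.join_singleton] at hc
      obtain ⟨⟨l, rfl⟩, _⟩ := h k (by simp)
      exact strip_getLast_not_space l c hc
    | cons b bs =>
      have hb : PySem.Chars.join ['\n'] (b :: bs) ≠ [] :=
        join_ne_nil b bs (h b (by simp)).2
      rw [PySem.Chars.join_cons_cons, List.getLast?_append] at hc
      have hsome : (PySem.Chars.join ['\n'] (b :: bs)).getLast?.isSome := by
        rw [List.getLast?_isSome]; exact hb
      obtain ⟨d, hd⟩ := Option.isSome_iff_exists.mp hsome
      rw [hd] at hc
      simp only [Option.some_or] at hc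
      rw [Option.some_inj] at hc
      subst hc
      exact ih (fun x hx => h x (by simp [List.mem_cons] at hx ⊢; tauto)) hd

lemma strip_join (ks : List (List Char))
    (h : ∀ k ∈ ks, (∃ l, k = PySem.Chars.strip l) ∧ k ≠ []) :
    PySem.Chars.strip (PySem.Chars.join ['\n'] ks) = PySem.Chars.join ['\n'] ks := by
  cases hks : ks with
  | nil => rfl
  | cons k ks' =>
    subst hks
    obtain ⟨⟨l, hkl⟩, hkne⟩ := h k (by simp)
    have hJne : PySem.Chars.join ['\n'] (k :: ks') ≠ [] := join_ne_nil k ks' hkne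
    -- head of the join is the head of k
    have hhead : (PySem.Chars.join ['\n'] (k :: ks')).head? = k.head? := by
      cases ks' with
      | nil => rw [PySem.Chars.join_singleton]
      | cons b bs =>
        rw [PySem.Chars.join_cons_cons, List.append_assoc, List.head?_append]
        cases hk : k.head? with
        | none => simp [List.head?_eq_none_iff] at hk; exact absurd hk hkne
        | some c => rfl
    obtain ⟨c, hc⟩ : ∃ c, k.head? = some c := by
      cases k with
      | nil => exact absurd rfl hkne
      | cons a as => exact ⟨a, rfl⟩
    have hcns : PySem.Chars.isspace c = false :=
      strip_head_not_space l c (by rw [← hkl]; exact hc)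
    have hJhead : (PySem.Chars.join ['\n'] (k :: ks')).head? = some c := by
      rw [hhead]; exact hc
    -- last of the join is non-space
    obtain ⟨d, hd⟩ := Option.isSome_iff_exists.mp
      ((List.getLast?_isSome).mpr hJne)
    have hdns : PySem.Chars.isspace d = false := join_getLast_not_space (k :: ks') h d hd
    -- lstrip is a no-op
    unfold PySem.Chars.strip
    have h1 : PySem.Chars.lstrip (PySem.Chars.join ['\n'] (k :: ks')) =
        PySem.Chars.join ['\n'] (k :: ks') := by
      obtain ⟨J', hJ'⟩ : ∃ J', PySem.Chars.join ['\n'] (k :: ks') = c :: J' := by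
        cases hJ : PySem.Chars.join ['\n'] (k :: ks') with
        | nil => exact absurd hJ hJne
        | cons a as =>
          rw [hJ] at hJhead
          simp at hJhead
          exact ⟨as, by rw [hJhead]⟩
      rw [hJ']
      unfold PySem.Chars.lstrip
      rw [List.dropWhile_cons]
      simp [hcns]
    rw [h1]
    -- rstrip is a no-op
    unfold PySem.Chars.rstrip
    have hrev : (PySem.Chars.join ['\n'] (k :: ks')).reverse.head? = some d := by
      rw [List.head?_reverse]; exact hd
    obtain ⟨t, ht⟩ : ∃ t, (PySem.Chars.join ['\n'] (k :: ks')).reverse = d :: t := by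
      cases hJ : (PySem.Chars.join ['\n'] (k :: ks')).reverse with
      | nil => rw [hJ] at hrev; simp at hrev
      | cons a as =>
        rw [hJ] at hrev
        simp at hrev
        exact ⟨as, by rw [hrev]⟩
    rw [ht, List.dropWhile_cons]
    simp only [hdns, Bool.false_eq_true, if_false]
    rw [← ht, List.reverse_reverse]

-- ===== VERDICT (by name: the statement is the Claim_ definition above) =====
theorem clean_ssh_output_py_spec : Claim_equal_clean_ssh_output_py := by
  intro output command _
  simp only [Spec_clean_ssh_output_py, clean_ssh_output_py, clean_ssh_output_py_alt]
  rw [buildB_eq_glue]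
  have hmem := cleanLoopA_mem command.toList (PySem.Chars.splitOn output.toList ['
']) true
  have h1 : ∀ k ∈ cleanLoopA command.toList (PySem.Chars.splitOn output.toList ['
']) true, k ≠ [] := by
    intro k hk
    have := (hmem k hk).2
    simp [pvGood, List.isEmpty_iff] at this
    exact this.1
  rw [pvGlue_eq_join _ h1, strip_join]
  intro k hk
  exact ⟨(hmem k hk).1, h1 k hk⟩
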